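-- pv_equiv track=rewrite | github.com/JingbiaoMei/hateful-meme-ft-analysis | scripts/utils/inspect_lora_modules.py | categorize_modules
-- ===== SOURCE A (Python) =====
-- def categorize_modules(modules):
--     """Categorize modules by component type."""
--     categories = {
--         "vision_tower": [],
--         "language_model": [],
--         "multimodal_projector": [],
--         "other": []
--     }
--
--     for module_name in modules.keys():
--         if "visual" in module_name or "vision" in module_name or "image" in module_name:
--             categories["vision_tower"].append(module_name)
--         elif "language_model" in module_name or "model.layers" in module_name or "lm_head" in module_name:
--             categories["language_model"].append(module_name)
--         elif "multi_modal_projector" in module_name or "projector" in module_name: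
--             categories["multimodal_projector"].append(module_name)
--         else:
--             categories["other"].append(module_name)
--
--     return categories
-- ===== SOURCE B (Python) =====
-- KEYWORD_SETS = {
--     "vision_tower": ("visual", "vision", "image"),
--     "language_model": ("language_model", "model.layers", "lm_head"),
--     "multimodal_projector": ("multi_modal_projector", "projector"),
-- }
--
--
-- def categorize_modules(modules):
--     """Categorize modules by staged filtering: each keyword set takes its
--     matches out of the remaining names; whatever survives is 'other'."""
--     categories = {}
--     remaining = list(modules.keys())
--     for cat, keywords in KEYWORD_SETS.items():
--         categories[cat] = [n for n in remaining if any(k in n for k in keywords)]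
--         remaining = [n for n in remaining if not any(k in n for k in keywords)]
--     categories["other"] = remaining
--     return categories
-- ===== Notes on version B (the rewrite author's own statement) =====
-- stated objective: alternative
-- what changed: Replaces A's single pass with a per-name if/elif chain appending into pre-made buckets by staged filtering: each keyword set in turn extracts its matches from the remaining names via list comprehensions, and the leftover list becomes 'other'.
import Mathlib
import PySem

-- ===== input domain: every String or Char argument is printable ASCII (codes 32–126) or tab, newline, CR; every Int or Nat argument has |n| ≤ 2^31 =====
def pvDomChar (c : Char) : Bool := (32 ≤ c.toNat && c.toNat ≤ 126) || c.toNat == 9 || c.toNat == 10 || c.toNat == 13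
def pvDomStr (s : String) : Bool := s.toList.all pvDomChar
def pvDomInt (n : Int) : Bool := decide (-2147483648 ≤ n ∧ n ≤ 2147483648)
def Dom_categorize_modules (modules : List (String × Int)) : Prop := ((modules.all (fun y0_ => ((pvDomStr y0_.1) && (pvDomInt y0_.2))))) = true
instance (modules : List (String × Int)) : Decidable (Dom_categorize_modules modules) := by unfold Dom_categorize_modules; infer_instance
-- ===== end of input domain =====

-- B categorizes by staged filtering (each keyword set extracts its matches from the remaining names) instead of A's per-name if/elif chain; objective: alternative.

-- ===== PORT A =====
def categorize_modules (modules : List (String × Int)) : List (String × List String) :=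
  let categories : PySem.Dict String (List String) :=
    ((((PySem.Dict.empty.insert "vision_tower" []).insert "language_model" []).insert
        "multimodal_projector" []).insert "other" [])
  let categories :=
    (PySem.Dict.ofList modules).keys.foldl (fun cats module_name =>
      if PySem.Str.isIn "visual" module_name || PySem.Str.isIn "vision" module_name ||
          PySem.Str.isIn "image" module_name then
        cats.modify "vision_tower" [] (· ++ [module_name])
      else if PySem.Str.isIn "language_model" module_name ||
          PySem.Str.isIn "model.layers" module_name || PySem.Str.isIn "lm_head" module_name then
        cats.modify "language_model" [] (· ++ [module_name])
      else if PySem.Str.isIn "multi_modal_projector" module_name ||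
          PySem.Str.isIn "projector" module_name then
        cats.modify "multimodal_projector" [] (· ++ [module_name])
      else
        cats.modify "other" [] (· ++ [module_name])) categories
  categories.items

-- ===== PORT B =====
-- KEYWORD_SETS, in insertion order
def pvKeywordSets : List (String × List String) :=
  [("vision_tower", ["visual", "vision", "image"]),
   ("language_model", ["language_model", "model.layers", "lm_head"]),
   ("multimodal_projector", ["multi_modal_projector", "projector"])]

-- any(k in n for k in keywords)
def pvAnyIn (keywords : List String) (n : String) : Bool :=
  keywords.any (fun k => PySem.Str.isIn k n)

def categorize_modules_alt (modules : List (String × Int)) : List (String × List String) :=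
  let remaining := (PySem.Dict.ofList modules).keys
  let st :=
    pvKeywordSets.foldl
      (fun (st : PySem.Dict String (List String) × List String) r =>
        (st.1.insert r.1 (st.2.filter (fun n => pvAnyIn r.2 n)),
         st.2.filter (fun n => !pvAnyIn r.2 n)))
      ((PySem.Dict.empty : PySem.Dict String (List String)), remaining)
  (st.1.insert "other" st.2).items

-- ===== PRECONDITION & SPEC =====
def Spec_categorize_modules (modules : List (String × Int)) (out : List (String × List String)) : Prop := out = categorize_modules_alt modules
instance (modules : List (String × Int)) (out : List (String × List String)) : Decidable (Spec_categorize_modules modules out) := by unfold Spec_categorize_modules; infer_instance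

-- ===== CLAIM (what is proved, stated in full; the proofs are below) =====
def Claim_equal_categorize_modules : Prop := ∀ (modules : List (String × Int)), Dom_categorize_modules modules → Spec_categorize_modules modules (categorize_modules modules)

-- ===== LEMMAS AND PROOFS =====

-- the three match predicates of A's branches
def pvP1 (n : String) : Bool :=
  PySem.Str.isIn "visual" n || PySem.Str.isIn "vision" n || PySem.Str.isIn "image" n
def pvP2 (n : String) : Bool :=
  PySem.Str.isIn "language_model" n || PySem.Str.isIn "model.layers" n || PySem.Str.isIn "lm_head" n
def pvP3 (n : String) : Bool :=
  PySem.Str.isIn "multi_modal_projector" n || PySem.Str.isIn "projector" n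

-- A's loop, with the initial bucket contents generalized
lemma A_loop (names : List String) (v l m o : List String) :
    names.foldl (fun cats module_name =>
      if PySem.Str.isIn "visual" module_name || PySem.Str.isIn "vision" module_name ||
          PySem.Str.isIn "image" module_name then
        cats.modify "vision_tower" [] (· ++ [module_name])
      else if PySem.Str.isIn "language_model" module_name ||
          PySem.Str.isIn "model.layers" module_name || PySem.Str.isIn "lm_head" module_name then
        cats.modify "language_model" [] (· ++ [module_name])
      else if PySem.Str.isIn "multi_modal_projector" module_name ||
          PySem.Str.isIn "projector" module_name then
        cats.modify "multimodal_projector" [] (· ++ [module_name])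
      else
        cats.modify "other" [] (· ++ [module_name]))
      (PySem.Dict.mk [("vision_tower", v), ("language_model", l),
                      ("multimodal_projector", m), ("other", o)])
    = PySem.Dict.mk
        [("vision_tower", v ++ names.filter pvP1),
         ("language_model", l ++ names.filter (fun n => !pvP1 n && pvP2 n)),
         ("multimodal_projector", m ++ names.filter (fun n => !pvP1 n && !pvP2 n && pvP3 n)),
         ("other", o ++ names.filter (fun n => !pvP1 n && !pvP2 n && !pvP3 n))] := by
  induction names generalizing v l m o with
  | nil => simp
  | cons n ns ih =>
    simp only [List.foldl_cons, List.filter_cons]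
    by_cases h1 : pvP1 n = true
    · rw [if_pos (show (PySem.Str.isIn "visual" n || PySem.Str.isIn "vision" n ||
          PySem.Str.isIn "image" n) = true from h1)]
      rw [show (PySem.Dict.mk [("vision_tower", v), ("language_model", l),
          ("multimodal_projector", m), ("other", o)]).modify "vision_tower" [] (· ++ [n])
          = PySem.Dict.mk [("vision_tower", v ++ [n]), ("language_model", l),
              ("multimodal_projector", m), ("other", o)] from rfl, ih]
      simp [h1]
    · rw [if_neg (show ¬ (PySem.Str.isIn "visual" n || PySem.Str.isIn "vision" n ||
          PySem.Str.isIn "image" n) = true from h1)]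
      by_cases h2 : pvP2 n = true
      · rw [if_pos (show (PySem.Str.isIn "language_model" n || PySem.Str.isIn "model.layers" n ||
            PySem.Str.isIn "lm_head" n) = true from h2)]
        rw [show (PySem.Dict.mk [("vision_tower", v), ("language_model", l),
            ("multimodal_projector", m), ("other", o)]).modify "language_model" [] (· ++ [n])
            = PySem.Dict.mk [("vision_tower", v), ("language_model", l ++ [n]),
                ("multimodal_projector", m), ("other", o)] from rfl, ih]
        simp [h1, h2]
      · rw [if_neg (show ¬ (PySem.Str.isIn "language_model" n || PySem.Str.isIn "model.layers" n ||
            PySem.Str.isIn "lm_head" n) = true from h2)]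
        by_cases h3 : pvP3 n = true
        · rw [if_pos (show (PySem.Str.isIn "multi_modal_projector" n ||
              PySem.Str.isIn "projector" n) = true from h3)]
          rw [show (PySem.Dict.mk [("vision_tower", v), ("language_model", l),
              ("multimodal_projector", m), ("other", o)]).modify "multimodal_projector" [] (· ++ [n])
              = PySem.Dict.mk [("vision_tower", v), ("language_model", l),
                  ("multimodal_projector", m ++ [n]), ("other", o)] from rfl, ih]
          simp [h1, h2, h3]
        · rw [if_neg (show ¬ (PySem.Str.isIn "multi_modal_projector" n ||
              PySem.Str.isIn "projector" n) = true from h3)]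
          rw [show (PySem.Dict.mk [("vision_tower", v), ("language_model", l),
              ("multimodal_projector", m), ("other", o)]).modify "other" [] (· ++ [n])
              = PySem.Dict.mk [("vision_tower", v), ("language_model", l),
                  ("multimodal_projector", m), ("other", o ++ [n])] from rfl, ih]
          simp [h1, h2, h3]

-- the three staged filter predicates of B equal A's branch predicates
lemma anyIn1 : (fun n => pvAnyIn ["visual", "vision", "image"] n) = pvP1 := by
  funext n; simp [pvAnyIn, pvP1, Bool.or_assoc]
lemma anyIn2 : (fun n => pvAnyIn ["language_model", "model.layers", "lm_head"] n) = pvP2 := by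
  funext n; simp [pvAnyIn, pvP2, Bool.or_assoc]
lemma anyIn3 : (fun n => pvAnyIn ["multi_modal_projector", "projector"] n) = pvP3 := by
  funext n; simp [pvAnyIn, pvP3, Bool.or_assoc]

-- ===== VERDICT (by name: the statement is the Claim_ definition above) =====
theorem categorize_modules_spec : Claim_equal_categorize_modules := by
  intro modules _
  unfold Spec_categorize_modules categorize_modules categorize_modules_alt
  dsimp only
  rw [show ((((PySem.Dict.empty.insert "vision_tower" ([] : List String)).insert
      "language_model" []).insert "multimodal_projector" []).insert "other" [])
      = PySem.Dict.mk [("vision_tower", []), ("language_model", []),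
          ("multimodal_projector", []), ("other", [])] from rfl]
  rw [A_loop]
  simp only [pvKeywordSets, List.foldl_cons, List.foldl_nil]
  rw [show ∀ (a b c d : List String),
      ((((PySem.Dict.empty : PySem.Dict String (List String)).insert "vision_tower" a).insert
          "language_model" b).insert "multimodal_projector" c).insert "other" d
      = PySem.Dict.mk [("vision_tower", a), ("language_model", b),
          ("multimodal_projector", c), ("other", d)] from fun a b c d => rfl]
  simp only [anyIn1, anyIn2, anyIn3, List.filter_filter]
  simp [Bool.and_assoc]
  refine ⟨List.filter_congr ?_, List.filter_congr ?_, List.filter_congr ?_⟩ <;>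
    intro a _ <;> cases pvP1 a <;> cases pvP2 a <;> cases pvP3 a <;> simp
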